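-- pv_equiv track=rewrite | github.com/smurphy13IIT/OpenAlex-Citation-Matrix | scratch_python.py | journal_title_replace
-- ===== SOURCE A (Python) =====
-- def journal_title_replace(decade_dict, journal_titles):
--     decade = {}
--     for key, value in decade_dict.items():
--         if key in journal_titles.values():
--             for key2, value2 in journal_titles.items():
--                 if value2 == key:
--                     decade[key2] = value
--     return decade
-- ===== SOURCE B (Python) =====
-- def journal_title_replace(decade_dict, journal_titles):
--     inverse = {}
--     for key2, value2 in journal_titles.items():
--         inverse.setdefault(value2, []).append(key2)
--     decade = {}
--     for key, value in decade_dict.items():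
--         for key2 in inverse.get(key, []):
--             decade[key2] = value
--     return decade
-- ===== Notes on version B (the rewrite author's own statement) =====
-- stated objective: faster
-- what changed: B inverts journal_titles once into a value->keys dict and does a single pass over decade_dict, replacing A's per-key membership test over journal_titles.values() and nested scan of journal_titles.items().
import Mathlib
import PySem

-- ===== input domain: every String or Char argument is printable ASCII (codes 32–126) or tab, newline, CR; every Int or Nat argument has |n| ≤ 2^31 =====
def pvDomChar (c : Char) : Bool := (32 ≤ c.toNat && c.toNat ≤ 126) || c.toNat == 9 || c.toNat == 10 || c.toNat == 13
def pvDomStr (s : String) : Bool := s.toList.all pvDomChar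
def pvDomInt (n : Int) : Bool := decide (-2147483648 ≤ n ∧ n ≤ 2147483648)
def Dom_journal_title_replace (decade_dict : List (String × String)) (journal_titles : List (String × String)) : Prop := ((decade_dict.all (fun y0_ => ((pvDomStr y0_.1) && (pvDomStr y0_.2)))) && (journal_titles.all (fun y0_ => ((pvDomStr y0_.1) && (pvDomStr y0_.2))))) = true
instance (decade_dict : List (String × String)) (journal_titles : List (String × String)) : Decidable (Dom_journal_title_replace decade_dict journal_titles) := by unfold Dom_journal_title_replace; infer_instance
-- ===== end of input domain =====

-- B inverts journal_titles once into a value->keys dict and does one pass over decade_dict (O(D+J)) instead of A's nested scans (O(D*J)).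


-- ===== PORT A =====
def journal_title_replace (decade_dict : List (String × String)) (journal_titles : List (String × String)) : List (String × String) :=
  (decade_dict.foldl (fun decade kv =>
      if (journal_titles.map Prod.snd).contains kv.1 then
        journal_titles.foldl (fun d kv2 => if kv2.2 == kv.1 then d.insert kv2.1 kv.2 else d) decade
      else decade)
    (PySem.Dict.empty : PySem.Dict String String)).items

-- ===== PORT B =====
-- inverse: for key2, value2 in journal_titles.items(): inverse.setdefault(value2, []).append(key2)
def jtr_inverse (journal_titles : List (String × String)) : PySem.Dict String (List String) :=
  journal_titles.foldl (fun inv kv2 => inv.modify kv2.2 [] (fun l => l ++ [kv2.1])) PySem.Dict.empty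

def journal_title_replace_alt (decade_dict : List (String × String)) (journal_titles : List (String × String)) : List (String × String) :=
  let inverse := jtr_inverse journal_titles
  (decade_dict.foldl (fun decade kv =>
      (inverse.getD kv.1 []).foldl (fun d key2 => d.insert key2 kv.2) decade)
    (PySem.Dict.empty : PySem.Dict String String)).items

-- ===== PRECONDITION & SPEC =====
def Spec_journal_title_replace (decade_dict : List (String × String)) (journal_titles : List (String × String)) (out : List (String × String)) : Prop := out = journal_title_replace_alt decade_dict journal_titles
instance (decade_dict : List (String × String)) (journal_titles : List (String × String)) (out : List (String × String)) : Decidable (Spec_journal_title_replace decade_dict journal_titles out) := by unfold Spec_journal_title_replace; infer_instance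

-- ===== CLAIM (what is proved, stated in full; the proofs are below) =====
def Claim_equal_journal_title_replace : Prop := ∀ (decade_dict : List (String × String)) (journal_titles : List (String × String)), Dom_journal_title_replace decade_dict journal_titles → Spec_journal_title_replace decade_dict journal_titles (journal_title_replace decade_dict journal_titles)

-- ===== LEMMAS AND PROOFS =====

-- the inverted dict at key k lists exactly the journal keys whose value is k, in order
theorem jtr_inverse_getD (journal_titles : List (String × String)) (k : String) :
    (jtr_inverse journal_titles).getD k [] =
      (journal_titles.filter (fun kv2 => kv2.2 == k)).map Prod.fst := by
  suffices h : ∀ (inv : PySem.Dict String (List String)),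
      (journal_titles.foldl (fun inv kv2 => inv.modify kv2.2 [] (fun l => l ++ [kv2.1])) inv).getD k []
        = inv.getD k [] ++ (journal_titles.filter (fun kv2 => kv2.2 == k)).map Prod.fst by
    simpa [jtr_inverse] using h PySem.Dict.empty
  induction journal_titles with
  | nil => intro inv; simp
  | cons kv2 rest ih =>
    intro inv
    by_cases hk : kv2.2 = k
    · simp [List.foldl_cons, ih, hk, PySem.Dict.getD_modify_self]
    · rw [List.foldl_cons, ih, PySem.Dict.getD_modify_of_ne _ _ _ (Ne.symm hk)]
      simp [hk]

-- A's inner scan over journal_titles equals folding over the filtered key list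
theorem jtr_inner_eq (journal_titles : List (String × String)) (k v : String)
    (decade : PySem.Dict String String) :
    journal_titles.foldl (fun d kv2 => if kv2.2 == k then d.insert kv2.1 v else d) decade =
      ((journal_titles.filter (fun kv2 => kv2.2 == k)).map Prod.fst).foldl
        (fun d key2 => d.insert key2 v) decade := by
  induction journal_titles generalizing decade with
  | nil => rfl
  | cons kv2 rest ih =>
    by_cases hk : kv2.2 = k
    · rw [List.foldl_cons, if_pos (by simp [hk]), List.filter_cons_of_pos (by simp [hk]),
        List.map_cons, List.foldl_cons, ih]
    · rw [List.foldl_cons, if_neg (by simp [hk]), List.filter_cons_of_neg (by simp [hk]), ih]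

theorem jtr_filter_nil_of_not_mem (journal_titles : List (String × String)) (k : String)
    (h : ¬ (journal_titles.map Prod.snd).contains k) :
    journal_titles.filter (fun kv2 => kv2.2 == k) = [] := by
  refine List.filter_eq_nil_iff.mpr ?_
  intro kv2 hmem
  simp only [beq_iff_eq]
  intro hkv
  exact h (by simp only [List.contains_iff_mem, List.mem_map]; exact ⟨kv2, hmem, hkv⟩)

-- ===== VERDICT (by name: the statement is the Claim_ definition above) =====
theorem journal_title_replace_spec : Claim_equal_journal_title_replace := by
  intro decade_dict journal_titles _
  unfold Spec_journal_title_replace journal_title_replace journal_title_replace_alt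
  congr 1
  apply PySem.List.foldl_congr_mem
  intro decade kv _
  by_cases hc : (journal_titles.map Prod.snd).contains kv.1
  · rw [if_pos hc, jtr_inverse_getD]
    exact jtr_inner_eq journal_titles kv.1 kv.2 decade
  · rw [if_neg hc, jtr_inverse_getD, jtr_filter_nil_of_not_mem journal_titles kv.1 hc]
    rfl
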